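-- pv_equiv track=rewrite | github.com/jawheressid/Sanad_sign | backend/app.py | _pick_caption_track
-- ===== SOURCE A (Python) =====
-- from typing import Optional
--
-- def _pick_caption_track(tracks: list) -> Optional[dict]:
--     if not tracks:
--         return None
--     preferred_exts = ("vtt", "srt", "ttml", "srv3", "srv1")
--     for ext in preferred_exts:
--         for track in tracks:
--             if track.get("ext") == ext:
--                 return track
--     return tracks[0]
-- ===== SOURCE B (Python) =====
-- from typing import Optional
--
-- _RANK = {"vtt": 0, "srt": 1, "ttml": 2, "srv3": 3, "srv1": 4}
--
-- def _pick_caption_track(tracks: list) -> Optional[dict]: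
--     if not tracks:
--         return None
--     best = None
--     best_rank = len(_RANK)
--     for track in tracks:
--         r = _RANK.get(track.get("ext"), len(_RANK))
--         if r < best_rank:
--             best, best_rank = track, r
--     return best if best is not None else tracks[0]
-- ===== Notes on version B (the rewrite author's own statement) =====
-- stated objective: simpler
-- what changed: Replaces the nested loop (for each preferred extension, rescan all tracks) by a single pass over tracks that keeps the track with the smallest priority rank (strict '<' so the first track wins ties), falling back to tracks[0] when no preferred extension occurs.
import Mathlib
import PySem

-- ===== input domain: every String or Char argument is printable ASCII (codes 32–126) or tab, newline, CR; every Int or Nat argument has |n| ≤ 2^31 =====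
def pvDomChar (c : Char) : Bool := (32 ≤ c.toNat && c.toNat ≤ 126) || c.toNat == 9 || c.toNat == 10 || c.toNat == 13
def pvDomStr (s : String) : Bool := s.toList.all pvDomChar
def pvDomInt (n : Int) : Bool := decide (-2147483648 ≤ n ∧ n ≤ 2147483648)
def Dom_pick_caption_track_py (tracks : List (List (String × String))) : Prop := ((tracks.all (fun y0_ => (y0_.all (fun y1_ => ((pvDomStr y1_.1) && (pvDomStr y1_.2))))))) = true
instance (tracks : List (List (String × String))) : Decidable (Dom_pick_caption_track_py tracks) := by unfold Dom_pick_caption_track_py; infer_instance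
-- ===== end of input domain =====

-- B replaces A's nested loop (for each preferred extension, rescan all tracks) by one pass
-- keeping the track of smallest priority rank (strict '<', so the first track wins ties): simpler.

-- ===== PORT A =====
-- 'for ext in preferred_exts: for track in tracks: if track.get("ext") == ext: return track'
-- outer loop = recursion over the tuple of extensions; inner loop = List.find? (first match).
def aLoop (tracks : List (List (String × String))) : List String → Option (List (String × String))
  | [] => PySem.List.pyGet? tracks 0          -- 'return tracks[0]' (tracks nonempty here)
  | e :: es =>
    match tracks.find? (fun t => (PySem.Dict.mk t).get? "ext" == some e) with
    | some t => some t
    | none => aLoop tracks es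

def pick_caption_track_py (tracks : List (List (String × String))) : Option (List (String × String)) :=
  if tracks.isEmpty then none
  else aLoop tracks ["vtt", "srt", "ttml", "srv3", "srv1"]

-- ===== PORT B =====
def rankTable : PySem.Dict String Nat :=
  PySem.Dict.mk [("vtt", 0), ("srt", 1), ("ttml", 2), ("srv3", 3), ("srv1", 4)]

-- r = _RANK.get(track.get("ext"), len(_RANK)); a None key is absent from _RANK, hence the default
def rnk (t : List (String × String)) : Nat :=
  match (PySem.Dict.mk t).get? "ext" with
  | some e => rankTable.getD e 5
  | none => 5

def pick_caption_track_py_alt (tracks : List (List (String × String))) : Option (List (String × String)) :=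
  if tracks.isEmpty then none
  else
    let acc := tracks.foldl
      (fun acc t => if rnk t < acc.2 then (some t, rnk t) else acc)
      ((none : Option (List (String × String))), 5)
    match acc.1 with
    | some b => some b
    | none => PySem.List.pyGet? tracks 0

-- ===== PRECONDITION & SPEC =====
def Spec_pick_caption_track_py (tracks : List (List (String × String))) (out : Option (List (String × String))) : Prop := out = pick_caption_track_py_alt tracks
instance (tracks : List (List (String × String))) (out : Option (List (String × String))) : Decidable (Spec_pick_caption_track_py tracks out) := by unfold Spec_pick_caption_track_py; infer_instance

-- ===== CLAIM (what is proved, stated in full; the proofs are below) =====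
def Claim_equal_pick_caption_track_py : Prop := ∀ (tracks : List (List (String × String))), Dom_pick_caption_track_py tracks → Spec_pick_caption_track_py tracks (pick_caption_track_py tracks)

-- ===== LEMMAS AND PROOFS =====

-- minimal rank over a list of tracks (5 if empty / no preferred extension present)
def mrank (ts : List (List (String × String))) : Nat :=
  ts.foldr (fun t m => min (rnk t) m) 5

-- the common value both programs compute on a nonempty list
def target (ts : List (List (String × String))) : Option (List (String × String)) :=
  if mrank ts < 5 then ts.find? (fun t => rnk t == mrank ts) else PySem.List.pyGet? ts 0

lemma rank_literal (x : String) :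
    rankTable.getD x 5 =
      if x == "vtt" then 0 else if x == "srt" then 1 else if x == "ttml" then 2
      else if x == "srv3" then 3 else if x == "srv1" then 4 else 5 := by
  unfold rankTable PySem.Dict.getD
  simp only [PySem.Dict.get?_mk_cons]
  split_ifs <;> simp_all [PySem.Dict.get?]

lemma rnk_le5 (t : List (String × String)) : rnk t ≤ 5 := by
  unfold rnk
  cases h : (PySem.Dict.mk t).get? "ext" with
  | none => simp
  | some e => simp only; rw [rank_literal e]; split_ifs <;> omega

lemma mrank_le5 (ts : List (List (String × String))) : mrank ts ≤ 5 := by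
  induction ts with
  | nil => simp [mrank]
  | cons t ts ih => simp only [mrank, List.foldr] at *; omega

lemma mrank_cons (t : List (String × String)) (ts : List (List (String × String))) :
    mrank (t :: ts) = min (rnk t) (mrank ts) := rfl

lemma mrank_le_of_mem {ts : List (List (String × String))} {t : List (String × String)}
    (h : t ∈ ts) : mrank ts ≤ rnk t := by
  induction ts with
  | nil => cases h
  | cons u us ih =>
    rcases List.mem_cons.mp h with rfl | h
    · rw [mrank_cons]; omega
    · rw [mrank_cons]; have := ih h; omega

lemma mrank_attained {ts : List (List (String × String))} (h : mrank ts < 5) :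
    ∃ t ∈ ts, rnk t = mrank ts := by
  induction ts with
  | nil => simp [mrank] at h
  | cons u us ih =>
    rw [mrank_cons] at h ⊢
    by_cases hc : rnk u ≤ mrank us
    · exact ⟨u, List.mem_cons_self, by omega⟩
    · have h5 : mrank us < 5 := by omega
      obtain ⟨t, ht, hr⟩ := ih h5
      exact ⟨t, List.mem_cons_of_mem _ ht, by omega⟩

-- the pointwise bridge: track.get("ext") == <ext literal>  ↔  rnk track == <its rank>
lemma bridge (e : String) (k : Nat) (hk : rankTable.getD e 5 = k) (hk5 : k < 5)
    (hinj : ∀ x : String, rankTable.getD x 5 = k → x = e) (t : List (String × String)) :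
    ((PySem.Dict.mk t).get? "ext" == some e) = (rnk t == k) := by
  unfold rnk
  cases h : (PySem.Dict.mk t).get? "ext" with
  | none => simp; omega
  | some x =>
    simp only [Option.some_beq_some]
    by_cases hx : x = e
    · subst hx; simp [hk]
    · have h2 : rankTable.getD x 5 ≠ k := fun hh => hx (hinj x hh)
      simp [hx, h2]

lemma inj0 : ∀ x : String, rankTable.getD x 5 = 0 → x = "vtt" := by
  intro x h; rw [rank_literal] at h; split_ifs at h <;> simp_all
lemma inj1 : ∀ x : String, rankTable.getD x 5 = 1 → x = "srt" := by
  intro x h; rw [rank_literal] at h; split_ifs at h <;> simp_all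
lemma inj2 : ∀ x : String, rankTable.getD x 5 = 2 → x = "ttml" := by
  intro x h; rw [rank_literal] at h; split_ifs at h <;> simp_all
lemma inj3 : ∀ x : String, rankTable.getD x 5 = 3 → x = "srv3" := by
  intro x h; rw [rank_literal] at h; split_ifs at h <;> simp_all
lemma inj4 : ∀ x : String, rankTable.getD x 5 = 4 → x = "srv1" := by
  intro x h; rw [rank_literal] at h; split_ifs at h <;> simp_all

-- one unfolding step of A's outer loop
lemma aStep (ts : List (List (String × String))) (e : String) (k : Nat) (es : List String)
    (hbr : ∀ t, ((PySem.Dict.mk t).get? "ext" == some e) = (rnk t == k))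
    (hm : k ≤ mrank ts) (hk : k < 5)
    (hnext : k + 1 ≤ mrank ts → aLoop ts es = target ts) :
    aLoop ts (e :: es) = target ts := by
  unfold aLoop
  have hp : (fun t => (PySem.Dict.mk t).get? "ext" == some e) = (fun t => rnk t == k) :=
    funext hbr
  rw [hp]
  cases hfind : ts.find? (fun t => rnk t == k) with
  | none =>
    simp only
    apply hnext
    rcases Nat.lt_or_ge (mrank ts) 5 with h5 | h5
    · obtain ⟨t, ht, hr⟩ := mrank_attained h5
      have hne : ¬ ((rnk t == k) = true) := List.find?_eq_none.mp hfind t ht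
      have : mrank ts ≠ k := fun he => hne (by simp [hr, he])
      omega
    · omega
  | some t =>
    simp only
    have hpt := List.find?_some hfind
    have hmem : t ∈ ts := List.mem_of_find?_eq_some hfind
    have hrt : rnk t = k := by simpa using hpt
    have hle : mrank ts ≤ k := hrt ▸ mrank_le_of_mem hmem
    have hmk : mrank ts = k := le_antisymm hle hm
    unfold target
    rw [if_pos (by omega), hmk, hfind]

-- A's loop over the full extension tuple computes 'target'
lemma aLoop_exts (ts : List (List (String × String))) :
    aLoop ts ["vtt", "srt", "ttml", "srv3", "srv1"] = target ts := by
  have h5 : 5 ≤ mrank ts → aLoop ts [] = target ts := by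
    intro h
    have := mrank_le5 ts
    unfold aLoop target
    rw [if_neg (by omega)]
  have h4 : 4 ≤ mrank ts → aLoop ts ["srv1"] = target ts := fun hm =>
    aStep ts "srv1" 4 [] (bridge "srv1" 4 (by decide) (by omega) inj4) hm (by omega) h5
  have h3 : 3 ≤ mrank ts → aLoop ts ["srv3", "srv1"] = target ts := fun hm =>
    aStep ts "srv3" 3 _ (bridge "srv3" 3 (by decide) (by omega) inj3) hm (by omega) h4
  have h2 : 2 ≤ mrank ts → aLoop ts ["ttml", "srv3", "srv1"] = target ts := fun hm =>
    aStep ts "ttml" 2 _ (bridge "ttml" 2 (by decide) (by omega) inj2) hm (by omega) h3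
  have h1 : 1 ≤ mrank ts → aLoop ts ["srt", "ttml", "srv3", "srv1"] = target ts := fun hm =>
    aStep ts "srt" 1 _ (bridge "srt" 1 (by decide) (by omega) inj1) hm (by omega) h2
  exact aStep ts "vtt" 0 _ (bridge "vtt" 0 (by decide) (by omega) inj0) (Nat.zero_le _) (by omega) h1

-- B's fold characterised: from any accumulator (b, r) with r ≤ 5, the result is either
-- untouched (no rank below r) or the first track attaining the minimal rank, with that rank
lemma fold_char (ts : List (List (String × String))) :
    ∀ (b : Option (List (String × String))) (r : Nat), r ≤ 5 →
      ts.foldl (fun acc t => if rnk t < acc.2 then (some t, rnk t) else acc) (b, r) =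
        if mrank ts < r then (ts.find? (fun t => rnk t == mrank ts), mrank ts) else (b, r) := by
  induction ts with
  | nil => intro b r hr; simp [mrank]; omega
  | cons t ts ih =>
    intro b r hr
    rw [List.foldl_cons]
    by_cases hrt : rnk t < r
    · rw [if_pos hrt]
      rw [ih (some t) (rnk t) (rnk_le5 t)]
      by_cases h2 : mrank ts < rnk t
      · rw [if_pos h2, if_pos (by rw [mrank_cons]; omega)]
        have hmc : mrank (t :: ts) = mrank ts := by rw [mrank_cons]; omega
        rw [hmc, List.find?_cons_of_neg (by simp; omega)]
      · rw [if_neg h2]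
        have hmc : mrank (t :: ts) = rnk t := by rw [mrank_cons]; omega
        rw [if_pos (by omega), hmc, List.find?_cons_of_pos (by simp)]
    · rw [if_neg hrt]
      rw [ih b r hr]
      by_cases h2 : mrank ts < r
      · rw [if_pos h2, if_pos (by rw [mrank_cons]; omega)]
        have hmc : mrank (t :: ts) = mrank ts := by rw [mrank_cons]; omega
        rw [hmc, List.find?_cons_of_neg (by simp; omega)]
      · rw [if_neg h2, if_neg (by rw [mrank_cons]; omega)]

lemma alt_eq_target (ts : List (List (String × String))) (hne : ts.isEmpty = false) :
    pick_caption_track_py_alt ts = target ts := by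
  unfold pick_caption_track_py_alt
  rw [hne]
  by_cases h5 : mrank ts < 5
  · obtain ⟨t, ht, hr⟩ := mrank_attained h5
    cases hf : ts.find? (fun u => rnk u == mrank ts) with
    | none => exact absurd (List.find?_eq_none.mp hf t ht) (by simp [hr])
    | some u =>
      simp only [Bool.false_eq_true, if_false]
      rw [fold_char ts none 5 (by omega), if_pos h5, hf]
      simp [target, h5, hf]
  · simp only [Bool.false_eq_true, if_false]
    rw [fold_char ts none 5 (by omega), if_neg h5]
    simp [target, h5]

-- ===== VERDICT (by name: the statement is the Claim_ definition above) =====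
theorem pick_caption_track_py_spec : Claim_equal_pick_caption_track_py := by
  intro ts _
  unfold Spec_pick_caption_track_py pick_caption_track_py
  cases hne : ts.isEmpty
  · simp only [Bool.false_eq_true, if_false]
    rw [aLoop_exts ts, alt_eq_target ts hne]
  · simp [pick_caption_track_py_alt, hne]
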